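-- pv_equiv track=rewrite | github.com/ashu2345/Hackerrank | limit-xor.py | solve
-- ===== SOURCE A (Python) =====
-- def subsets(a,ssets):
--     if a:
--         return subsets(a[1:],ssets)+subsets(a[1:],ssets+[a[0]])
--     return [ssets]
--
-- def solve(a, k):
--     count = 0
--     reqsets = subsets(a,[])
--     reqsets.remove([])
--     for s in reqsets:
--         if len(s) == 1 and s[0]<k:
--             count+=1
--         elif len(s)>1:
--             subxor = s[0]
--             for e in range(1,len(s)):
--                 subxor^=s[e]
--             if subxor<k:
--                 count+=1
--     return count
-- ===== SOURCE B (Python) =====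
-- def solve(a, k):
--     # maintain the XOR value of every subset directly (doubling), instead of
--     # building all subset lists and re-XORing each one
--     xors = [0]
--     for x in a:
--         xors += [v ^ x for v in xors]
--     return sum(1 for v in xors if v < k) - (1 if 0 < k else 0)
-- ===== Notes on version B (the rewrite author's own statement) =====
-- stated objective: alternative
-- what changed: B maintains the XOR value of every subset directly (doubling a value list per element) and counts values < k at the end, instead of recursively materialising all 2^n subset lists, removing [], and re-XORing each subset with an inner index loop.
import Mathlib
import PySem

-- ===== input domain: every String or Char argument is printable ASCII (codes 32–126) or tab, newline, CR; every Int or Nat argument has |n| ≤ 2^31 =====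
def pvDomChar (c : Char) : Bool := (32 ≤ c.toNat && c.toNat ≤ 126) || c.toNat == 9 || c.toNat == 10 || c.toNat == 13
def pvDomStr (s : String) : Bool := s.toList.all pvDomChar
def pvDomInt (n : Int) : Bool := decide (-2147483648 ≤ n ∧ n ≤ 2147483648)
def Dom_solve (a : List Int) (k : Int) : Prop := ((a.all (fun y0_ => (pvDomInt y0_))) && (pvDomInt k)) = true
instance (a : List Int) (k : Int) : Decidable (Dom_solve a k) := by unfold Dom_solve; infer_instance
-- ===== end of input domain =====

-- B replaces A's recursive enumeration of all subset lists (plus remove([]) and a per-subset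
-- XOR index loop) by one doubling pass over subset XOR values (both remain exponential in len(a)).

-- ===== PORT A =====
-- subsets(a, ssets): recursive enumeration of all subsets, accumulator ssets
def subsetsA : List Int → List Int → List (List Int)
  | [], ssets => [ssets]
  | x :: rest, ssets => subsetsA rest ssets ++ subsetsA rest (ssets ++ [x])

-- inner loop of A: subxor = s[0]; for e in range(1, len(s)): subxor ^= s[e]
-- (pyGetD's default 0 is never used: every index A takes is in range on the branch that runs it)
def subxorA (s : List Int) : Int :=
  (PySem.List.pyRange 1 (PySem.List.len s) 1).foldl
    (fun subxor e => PySem.Int.bxor subxor (PySem.List.pyGetD s e 0))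
    (PySem.List.pyGetD s 0 0)

def solve (a : List Int) (k : Int) : Int :=
  let reqsets := (PySem.List.remove? (subsetsA a []) []).getD []
  reqsets.foldl
    (fun count s =>
      if PySem.List.len s = 1 ∧ PySem.List.pyGetD s 0 0 < k then count + 1
      else if 1 < PySem.List.len s then
        if subxorA s < k then count + 1 else count
      else count)
    0

-- ===== PORT B =====
def solve_alt (a : List Int) (k : Int) : Int :=
  let xors := a.foldl (fun xs x => xs ++ xs.map (fun v => PySem.Int.bxor v x)) [0]
  ((xors.countP (fun v => decide (v < k)) : Nat) : Int) - (if 0 < k then 1 else 0)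

-- ===== PRECONDITION & SPEC =====
def Spec_solve (a : List Int) (k : Int) (out : Int) : Prop := out = solve_alt a k
instance (a : List Int) (k : Int) (out : Int) : Decidable (Spec_solve a k out) := by unfold Spec_solve; infer_instance

-- ===== CLAIM (what is proved, stated in full; the proofs are below) =====
def Claim_equal_solve : Prop := ∀ (a : List Int) (k : Int), Dom_solve a k → Spec_solve a k (solve a k)

-- ===== LEMMAS AND PROOFS =====

-- the XOR of a whole subset (the reference quantity both sides compute)
def xorOf (s : List Int) : Int := s.foldl PySem.Int.bxor 0

theorem bxor_eq_xor (a b : Int) : PySem.Int.bxor a b = Int.xor a b := by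
  rcases a with m | m <;> rcases b with n | n <;>
    simp [PySem.Int.bxor, Int.xor, Int.negSucc_eq] <;> omega

theorem int_xor_assoc (a b c : Int) : Int.xor (Int.xor a b) c = Int.xor a (Int.xor b c) := by
  rcases a with m | m <;> rcases b with n | n <;> rcases c with p | p <;>
    simp [Int.xor, Nat.xor_assoc]

theorem bxor_assoc (a b c : Int) :
    PySem.Int.bxor (PySem.Int.bxor a b) c = PySem.Int.bxor a (PySem.Int.bxor b c) := by
  simp [bxor_eq_xor, int_xor_assoc]

theorem zero_bxor (a : Int) : PySem.Int.bxor 0 a = a := by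
  rw [PySem.Int.bxor_comm, PySem.Int.bxor_zero]

theorem foldl_bxor (s : List Int) : ∀ c : Int, s.foldl PySem.Int.bxor c = PySem.Int.bxor c (xorOf s) := by
  induction s with
  | nil => intro c; simp [xorOf, PySem.Int.bxor_zero]
  | cons x s ih =>
    intro c
    show List.foldl PySem.Int.bxor (PySem.Int.bxor c x) s = _
    rw [ih]
    show _ = PySem.Int.bxor c (List.foldl PySem.Int.bxor (PySem.Int.bxor 0 x) s)
    rw [zero_bxor, ih x, bxor_assoc]

theorem xorOf_cons (x : Int) (s : List Int) : xorOf (x :: s) = PySem.Int.bxor x (xorOf s) := by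
  show List.foldl PySem.Int.bxor (PySem.Int.bxor 0 x) s = _
  rw [zero_bxor, foldl_bxor]

theorem subsetsA_map (a : List Int) : ∀ ss, subsetsA a ss = (subsetsA a []).map (ss ++ ·) := by
  induction a with
  | nil => intro ss; simp [subsetsA]
  | cons x r ih =>
    intro ss
    show subsetsA r ss ++ subsetsA r (ss ++ [x])
        = ((subsetsA r []) ++ subsetsA r ([] ++ [x])).map (ss ++ ·)
    rw [ih ss, ih (ss ++ [x]), List.nil_append, ih [x]]
    simp [List.map_map, Function.comp, List.append_assoc]

theorem subsetsA_struct (a : List Int) :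
    ∃ t, subsetsA a [] = [] :: t ∧ ∀ s ∈ t, s ≠ [] := by
  induction a with
  | nil => exact ⟨[], rfl, by simp⟩
  | cons x r ih =>
    rcases ih with ⟨t, ht, hne⟩
    refine ⟨t ++ (subsetsA r []).map ([x] ++ ·), ?_, ?_⟩
    · show subsetsA r [] ++ subsetsA r ([] ++ [x]) = _
      rw [List.nil_append, subsetsA_map r [x], ht]
      rfl
    · intro s hs
      rcases List.mem_append.mp hs with h | h
      · exact hne s h
      · rcases List.mem_map.mp h with ⟨u, _, rfl⟩
        simp

-- A's loop body increments iff the subset's XOR is < k (for nonempty subsets)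
theorem stepA_eq (k : Int) (c : Int) (s : List Int) (hs : s ≠ []) :
    (if PySem.List.len s = 1 ∧ PySem.List.pyGetD s 0 0 < k then c + 1
     else if 1 < PySem.List.len s then
       if subxorA s < k then c + 1 else c
     else c)
    = if decide (xorOf s < k) then c + 1 else c := by
  rcases s with _ | ⟨y, ys⟩
  · exact absurd rfl hs
  rcases ys with _ | ⟨z, zs⟩
  · -- singleton: xorOf [y] = y
    have hx : xorOf [y] = y := by simp [xorOf, zero_bxor]
    simp [PySem.List.len_eq, PySem.List.pyGetD_zero_cons, hx]
  · -- length ≥ 2: the index loop computes the fold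
    have hlen : ¬ (PySem.List.len (y :: z :: zs) = 1) := by
      simp only [PySem.List.len_eq, List.length_cons]; omega
    have hlen2 : 1 < PySem.List.len (y :: z :: zs) := by
      simp only [PySem.List.len_eq, List.length_cons]; omega
    have hsub : subxorA (y :: z :: zs) = xorOf (y :: z :: zs) := by
      unfold subxorA
      rw [PySem.List.foldl_pyRange_pyGetD (y :: z :: zs) 0 PySem.Int.bxor _ (by norm_num)]
      have : PySem.List.pyGetD (y :: z :: zs) 0 0 = y := PySem.List.pyGetD_zero_cons _ _ _
      rw [this]
      show (z :: zs).foldl PySem.Int.bxor y = _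
      rw [foldl_bxor, ← xorOf_cons]
    rw [if_neg (fun hh => hlen hh.1), if_pos hlen2, hsub]
    by_cases h : xorOf (y :: z :: zs) < k <;> simp [h]

theorem countP_eq_sum_map {α : Type} (p : α → Bool) (L : List α) :
    (L.map (fun v => if p v then 1 else 0)).sum = L.countP p := by
  induction L with
  | nil => rfl
  | cons x L ih => by_cases h : p x <;> simp [h, ih, Nat.add_comm]

theorem sum_map_add {α : Type} (f g : α → Nat) (L : List α) :
    (L.map (fun v => f v + g v)).sum = (L.map f).sum + (L.map g).sum := by
  induction L with
  | nil => rfl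
  | cons x L ih => simp [ih]; omega

-- number of subsets of a whose XOR, further XORed with v, is < k
def cntA (k : Int) (a : List Int) (v : Int) : Nat :=
  (subsetsA a []).countP (fun s => decide (PySem.Int.bxor v (xorOf s) < k))

theorem cntA_nil (k v : Int) : cntA k [] v = if decide (v < k) then 1 else 0 := by
  simp [cntA, subsetsA, xorOf, List.countP_cons, PySem.Int.bxor_zero]

theorem cntA_cons (k : Int) (x : Int) (r : List Int) (v : Int) :
    cntA k (x :: r) v = cntA k r v + cntA k r (PySem.Int.bxor v x) := by
  unfold cntA
  show List.countP _ (subsetsA r [] ++ subsetsA r ([] ++ [x])) = _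
  rw [List.nil_append, subsetsA_map r [x], List.countP_append, List.countP_map]
  congr 1
  apply List.countP_congr
  intro s _
  have hx : xorOf (x :: s) = PySem.Int.bxor x (xorOf s) := xorOf_cons x s
  simp [Function.comp, hx, ← bxor_assoc]

theorem main_count (k : Int) (a : List Int) : ∀ L : List Int,
    (a.foldl (fun xs x => xs ++ xs.map (fun v => PySem.Int.bxor v x)) L).countP
        (fun v => decide (v < k))
      = (L.map (cntA k a)).sum := by
  induction a with
  | nil =>
    intro L
    simp only [List.foldl_nil]
    rw [← countP_eq_sum_map,
      List.map_congr_left (fun v _ => (cntA_nil k v).symm)]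
  | cons x r ih =>
    intro L
    simp only [List.foldl_cons]
    rw [ih (L ++ L.map (fun v => PySem.Int.bxor v x))]
    rw [List.map_append, List.sum_append, List.map_map]
    have h1 : (L.map (cntA k (x :: r))).sum
        = (L.map (fun v => cntA k r v + cntA k r (PySem.Int.bxor v x))).sum := by
      congr 1
      apply List.map_congr_left
      intro v _
      exact cntA_cons k x r v
    rw [h1, sum_map_add]
    rfl

-- ===== VERDICT (by name: the statement is the Claim_ definition above) =====
theorem solve_spec : Claim_equal_solve := by
  intro a k _
  show solve a k = solve_alt a k
  rcases subsetsA_struct a with ⟨t, ht, hne⟩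
  -- A's side
  have hA : solve a k = ((t.countP (fun s => decide (xorOf s < k)) : Nat) : Int) := by
    unfold solve
    rw [ht, PySem.List.remove?_cons_self, Option.getD_some]
    rw [PySem.List.foldl_congr_mem t _
      (fun c s => if decide (xorOf s < k) then c + 1 else c) 0
      (fun c s hs => stepA_eq k c s (hne s hs))]
    rw [PySem.List.foldl_count_if]
    simp
  -- B's side
  have hB : solve_alt a k
      = ((cntA k a 0 : Nat) : Int) - (if 0 < k then 1 else 0) := by
    show (((List.foldl (fun xs x => xs ++ xs.map (fun v => PySem.Int.bxor v x)) [0] a).countP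
        (fun v => decide (v < k)) : Nat) : Int) - (if 0 < k then 1 else 0) = _
    rw [main_count k a [0]]
    simp
  have hC : cntA k a 0 = t.countP (fun s => decide (xorOf s < k))
      + (if 0 < k then 1 else 0) := by
    unfold cntA
    rw [ht]
    have hp : (fun s => decide (PySem.Int.bxor 0 (xorOf s) < k))
        = (fun s => decide (xorOf s < k)) := by
      funext s; rw [zero_bxor]
    rw [hp, List.countP_cons]
    have hx : xorOf ([] : List Int) = 0 := rfl
    simp [hx]
  rw [hA, hB, hC]
  by_cases h : 0 < k <;> simp [h]
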